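-- pv_equiv track=rewrite | github.com/LumenPrima/AMazeGen | algorithms/unicursal.py | _serpentine
-- ===== SOURCE A (Python) =====
-- def _serpentine(width, height):
--     path = []
--     for y in range(height):
--         if y % 2 == 0:
--             for x in range(width):
--                 path.append((y, x))
--         else:
--             for x in range(width - 1, -1, -1):
--                 path.append((y, x))
--     return path
-- ===== SOURCE B (Python) =====
-- def _serpentine(width, height):
--     if width <= 0 or height <= 0:
--         return []
--     return [(i // width,
--              i % width if (i // width) % 2 == 0 else width - 1 - i % width)
--             for i in range(width * height)]
-- ===== Notes on version B (the rewrite author's own statement) =====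
-- stated objective: alternative
-- what changed: replaces the nested per-row loops with forward/reverse branches by a single flat loop over i in range(width*height), deriving each (y, x) arithmetically from the linear index via // and %
import Mathlib
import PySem

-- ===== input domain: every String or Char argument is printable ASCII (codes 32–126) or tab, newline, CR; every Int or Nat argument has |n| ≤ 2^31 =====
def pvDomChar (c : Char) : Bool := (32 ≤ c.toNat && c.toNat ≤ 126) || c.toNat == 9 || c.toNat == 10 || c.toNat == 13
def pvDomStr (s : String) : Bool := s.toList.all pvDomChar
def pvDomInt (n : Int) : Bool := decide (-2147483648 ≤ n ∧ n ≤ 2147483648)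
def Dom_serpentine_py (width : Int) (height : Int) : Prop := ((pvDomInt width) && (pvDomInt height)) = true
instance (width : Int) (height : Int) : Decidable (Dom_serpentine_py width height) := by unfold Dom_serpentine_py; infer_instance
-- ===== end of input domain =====

-- B replaces A's nested per-row loops (with a forward/reverse branch) by one flat loop over
-- the linear index, computing each coordinate arithmetically; same cost, different decomposition.

-- ===== PORT A =====
-- literal transliteration of A: outer loop over range(height), per row an inner
-- append loop over range(width) or range(width-1, -1, -1)
def serpentine_py (width : Int) (height : Int) : List (Int × Int) :=
  (PySem.List.pyRange 0 height 1).foldl (fun path y =>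
    if PySem.Int.mod y 2 == 0 then
      (PySem.List.pyRange 0 width 1).foldl (fun p x => p ++ [(y, x)]) path
    else
      (PySem.List.pyRange (width - 1) (-1) (-1)).foldl (fun p x => p ++ [(y, x)]) path) []

-- ===== PORT B =====
-- literal transliteration of Source B: guard, then one comprehension over range(width*height)
def serpentine_py_alt (width : Int) (height : Int) : List (Int × Int) :=
  if width ≤ 0 ∨ height ≤ 0 then []
  else
    (PySem.List.pyRange 0 (width * height) 1).map (fun i =>
      (PySem.Int.floordiv i width,
       if PySem.Int.mod (PySem.Int.floordiv i width) 2 == 0 then PySem.Int.mod i width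
       else width - 1 - PySem.Int.mod i width))

-- ===== PRECONDITION & SPEC =====
def Spec_serpentine_py (width : Int) (height : Int) (out : List (Int × Int)) : Prop := out = serpentine_py_alt width height
instance (width : Int) (height : Int) (out : List (Int × Int)) : Decidable (Spec_serpentine_py width height out) := by unfold Spec_serpentine_py; infer_instance

-- ===== CLAIM (what is proved, stated in full; the proofs are below) =====
def Claim_equal_serpentine_py : Prop := ∀ (width : Int) (height : Int), Dom_serpentine_py width height → Spec_serpentine_py width height (serpentine_py width height)

-- ===== LEMMAS AND PROOFS =====

-- one row of A, as a map
lemma rowA (w y : Int) (acc : List (Int × Int)) :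
    (if PySem.Int.mod y 2 == 0 then
      (PySem.List.pyRange 0 w 1).foldl (fun p x => p ++ [(y, x)]) acc
    else
      (PySem.List.pyRange (w - 1) (-1) (-1)).foldl (fun p x => p ++ [(y, x)]) acc)
    = acc ++ (if PySem.Int.mod y 2 == 0 then
        (PySem.List.pyRange 0 w 1).map (fun x => (y, x))
      else
        (PySem.List.pyRange (w - 1) (-1) (-1)).map (fun x => (y, x))) := by
  split <;> rw [PySem.List.foldl_append_singleton_eq_map]

-- A as a flatMap of rows
lemma A_flatMap (w h : Int) :
    serpentine_py w h = (PySem.List.pyRange 0 h 1).flatMap (fun y =>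
      if PySem.Int.mod y 2 == 0 then
        (PySem.List.pyRange 0 w 1).map (fun x => (y, x))
      else
        (PySem.List.pyRange (w - 1) (-1) (-1)).map (fun x => (y, x))) := by
  unfold serpentine_py
  rw [PySem.List.foldl_congr_mem _ _ (fun acc y => acc ++
    (if PySem.Int.mod y 2 == 0 then
        (PySem.List.pyRange 0 w 1).map (fun x => (y, x))
      else
        (PySem.List.pyRange (w - 1) (-1) (-1)).map (fun x => (y, x)))) _
    (fun acc y _ => rowA w y acc)]
  rw [PySem.List.foldl_append_eq_flatMap]
  simp

-- B's element function on a linear index inside row h is A's row-h entry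
lemma B_elem (w h k : Int) (hw : 0 < w) (hk0 : 0 ≤ k) (hk : k < w) :
    PySem.Int.floordiv (w * h + k) w = h ∧ PySem.Int.mod (w * h + k) w = k := by
  rw [PySem.Int.floordiv_eq_ediv_of_pos hw, PySem.Int.mod_eq_emod_of_pos hw]
  constructor
  · rw [Int.add_comm, Int.add_mul_ediv_left k h (ne_of_gt hw),
      Int.ediv_eq_zero_of_lt hk0 hk, Int.zero_add]
  · rw [Int.add_comm, Int.add_mul_emod_self_left, Int.emod_eq_of_lt hk0 hk]

-- main induction: for 0 ≤ h, A = B's comprehension (positive width)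
lemma main_ind (w : Int) (hw : 0 < w) (n : Nat) :
    serpentine_py w (n : Int) = (PySem.List.pyRange 0 (w * n) 1).map (fun i =>
      (PySem.Int.floordiv i w,
       if PySem.Int.mod (PySem.Int.floordiv i w) 2 == 0 then PySem.Int.mod i w
       else w - 1 - PySem.Int.mod i w)) := by
  induction n with
  | zero => simp [A_flatMap, PySem.List.pyRange_one_eq_nil]
  | succ m ih =>
    have hsplitA : PySem.List.pyRange 0 ((m : Int) + 1) 1
        = PySem.List.pyRange 0 (m : Int) 1 ++ [(m : Int)] :=
      PySem.List.pyRange_one_succ_right (by positivity)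
    have hsplitB : PySem.List.pyRange 0 (w * ((m : Int) + 1)) 1
        = PySem.List.pyRange 0 (w * m) 1 ++ PySem.List.pyRange (w * m) (w * ((m : Int) + 1)) 1 :=
      PySem.List.pyRange_one_append 0 (w * m) _ (by positivity) (by nlinarith)
    rw [A_flatMap] at ih ⊢
    push_cast
    rw [hsplitA, hsplitB, List.flatMap_append, List.map_append, ih]
    congr 1
    -- remaining: row m = map over the last linear segment
    have hseg : PySem.List.pyRange (w * m) (w * ((m : Int) + 1)) 1
        = List.map (fun k : Nat => w * (m : Int) + (k : Int)) (List.range w.toNat) := by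
      rw [PySem.List.pyRange_one]
      have e : (w * ((m : Int) + 1) - w * m) = w := by ring
      rw [e]
    rw [hseg, List.flatMap_singleton, List.map_map]
    have hmk : ∀ k : Nat, k < w.toNat →
        (PySem.Int.floordiv (w * m + k) w = (m : Int) ∧ PySem.Int.mod (w * m + k) w = (k : Int)) := by
      intro k hk
      exact B_elem w m k hw (by positivity) (by omega)
    split
    case isTrue heven =>
      rw [PySem.List.pyRange_one]
      simp only [List.map_map, Int.sub_zero]
      apply List.map_congr_left
      intro k hk
      simp only [List.mem_range] at hk
      obtain ⟨hd, hm⟩ := hmk k (by omega)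
      simp [Function.comp, hd, hm]
      simp at heven
      omega
    case isFalse hodd =>
      rw [PySem.List.pyRange_neg_one]
      simp only [List.map_map]
      have hlen : ((w - 1) - (-1)).toNat = w.toNat := by omega
      rw [hlen]
      apply List.map_congr_left
      intro k hk
      simp only [List.mem_range] at hk
      obtain ⟨hd, hm⟩ := hmk k (by omega)
      simp [Function.comp, hd, hm]
      simp at hodd
      omega

-- degenerate grids: A returns []
lemma A_degenerate (w h : Int) (hdeg : w ≤ 0 ∨ h ≤ 0) : serpentine_py w h = [] := by
  rw [A_flatMap]
  rcases hdeg with hw | hh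
  · apply List.flatMap_eq_nil_iff.mpr
    intro y _
    split
    · rw [PySem.List.pyRange_one_eq_nil hw]; simp
    · rw [PySem.List.pyRange_neg_one_eq_nil (by omega)]; simp
  · rw [PySem.List.pyRange_one_eq_nil hh]; simp

-- ===== VERDICT (by name: the statement is the Claim_ definition above) =====
theorem serpentine_py_spec : Claim_equal_serpentine_py := by
  intro w h _
  unfold Spec_serpentine_py serpentine_py_alt
  split
  case isTrue hdeg => exact A_degenerate w h hdeg
  case isFalse hpos =>
    obtain ⟨n, rfl⟩ := Int.eq_ofNat_of_zero_le (by omega : (0:Int) ≤ h)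
    exact main_ind w (by omega) n
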